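-- pv_equiv track=rewrite | github.com/maanavshah/leetcode | get-rhyme-pattern.py | getRhymePattern
-- ===== SOURCE A (Python) =====
-- def getRhymePattern(word):
--   vowels = ['a', 'e', 'i', 'o', 'u', 'y']
--   flag = False
--   res = ''
--   if word[0] == 'y':
--     word = word[1:]
--
--   for i, w in enumerate(word[::-1]):
--     if w in vowels:
--       flag = True
--       if i == 0 and w == 'y':
--         flag = False
--     elif flag:
--         break
--     res += w
--   return res[::-1]
-- ===== SOURCE B (Python) =====
-- def getRhymePattern(word):
--     if word[0] == 'y':
--         word = word[1:]
--     n = len(word)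
--     # rightmost vowel position; a word-final 'y' does not count, an inner 'y' does
--     j = n - 1
--     while j >= 0 and not (word[j] in 'aeiou' or (word[j] == 'y' and j != n - 1)):
--         j -= 1
--     if j < 0:
--         return word
--     # grow the vowel run leftwards
--     while j > 0 and word[j - 1] in 'aeiouy':
--         j -= 1
--     return word[j:]
-- ===== Notes on version B (the rewrite author's own statement) =====
-- stated objective: alternative
-- what changed: A builds the result by a reversed accumulate-with-flag pass (append each char, break at the first consonant after a counting vowel, reverse at the end); B instead locates the rightmost counting vowel by an index scan from the end, grows that vowel run leftwards with a second index loop, and returns the slice word[start:].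
import Mathlib
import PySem

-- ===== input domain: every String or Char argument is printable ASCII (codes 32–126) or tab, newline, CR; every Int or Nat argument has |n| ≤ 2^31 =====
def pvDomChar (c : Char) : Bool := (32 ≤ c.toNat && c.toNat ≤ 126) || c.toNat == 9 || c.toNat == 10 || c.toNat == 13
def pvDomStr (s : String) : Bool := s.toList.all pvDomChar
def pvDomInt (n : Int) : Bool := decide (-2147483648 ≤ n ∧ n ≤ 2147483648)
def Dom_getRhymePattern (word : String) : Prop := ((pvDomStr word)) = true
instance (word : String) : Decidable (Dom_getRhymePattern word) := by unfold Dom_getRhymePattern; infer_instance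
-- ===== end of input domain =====

-- B replaces A's reverse accumulate-with-flag pass by locating the rightmost counting
-- vowel by index from the end, growing its vowel run leftwards, and slicing (objective: alternative).

-- ===== PORT A =====
-- 'w in vowels' with vowels = ['a','e','i','o','u','y']
def pvIsV (c : Char) : Bool := ['a', 'e', 'i', 'o', 'u', 'y'].contains c

-- the for-loop of A: state (flag, res); break = return res
def pvALoop : List (Int × Char) → Bool → List Char → List Char
  | [], _, res => res
  | (i, w) :: t, flag, res =>
    if pvIsV w then
      pvALoop t (if i == 0 && w == 'y' then false else true) (res ++ [w])
    else if flag then res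
    else pvALoop t flag (res ++ [w])

def getRhymePattern (word : String) : String :=
  match word.toList with
  | [] => ""   -- word[0] raises IndexError; excluded by Pre_
  | c :: rest =>
    let cs := if c = 'y' then rest else c :: rest   -- the strip of a leading 'y'
    String.ofList (pvALoop (PySem.List.enumerate cs.reverse 0) false []).reverse

-- ===== PORT B =====
-- c in 'aeiouy'
def pvIsVb (c : Char) : Bool := ['a', 'e', 'i', 'o', 'u', 'y'].contains c

-- c in 'aeiou'
def pvIsVq (c : Char) : Bool := ['a', 'e', 'i', 'o', 'u'].contains c

-- the loop condition: word[j] in 'aeiou' or (word[j] == 'y' and j != n - 1)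
def pvQual (cs : List Char) (n : Nat) (j : Nat) : Bool :=
  pvIsVq (cs.getD j ' ') || (cs.getD j ' ' == 'y' && j != n - 1)

-- 'while j >= 0 and not qual: j -= 1'; fuel f = j + 1, so the initial call has f = n
def pvBFind (cs : List Char) (n : Nat) : Nat → Option Nat
  | 0 => none
  | f + 1 => if pvQual cs n f then some f else pvBFind cs n f

-- 'while j > 0 and word[j-1] in 'aeiouy': j -= 1'
def pvBGrow (cs : List Char) : Nat → Nat
  | 0 => 0
  | j + 1 => if pvIsVb (cs.getD j ' ') then pvBGrow cs j else j + 1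

def getRhymePattern_alt (word : String) : String :=
  match word.toList with
  | [] => ""   -- word[0] raises IndexError; excluded by Pre_
  | c :: rest =>
    let cs := if c = 'y' then rest else c :: rest
    match pvBFind cs cs.length cs.length with
    | none => String.ofList cs
    | some j => String.ofList (cs.drop (pvBGrow cs j))

-- ===== PRECONDITION & SPEC =====
-- Pre_ excludes only the empty string, on which A raises IndexError at word[0] (B raises too).
def Pre_getRhymePattern (word : String) : Prop := word ≠ ""
instance (word : String) : Decidable (Pre_getRhymePattern word) := by unfold Pre_getRhymePattern; infer_instance
def pvWitness_getRhymePattern : String := "day"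

def Spec_getRhymePattern (word : String) (out : String) : Prop := out = getRhymePattern_alt word
instance (word : String) (out : String) : Decidable (Spec_getRhymePattern word out) := by unfold Spec_getRhymePattern; infer_instance

-- ===== CLAIM (what is proved, stated in full; the proofs are below) =====
def Claim_equal_getRhymePattern : Prop := ∀ (word : String), Dom_getRhymePattern word → Pre_getRhymePattern word → Spec_getRhymePattern word (getRhymePattern word)

-- ===== LEMMAS AND PROOFS =====
def pvConsRun (t : List Char) : List Char :=
  match t.dropWhile (fun c => !pvIsV c) with
  | [] => t
  | v :: u => t.takeWhile (fun c => !pvIsV c) ++ v :: u.takeWhile pvIsV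

def pvS : List Char → List Char
  | [] => []
  | w :: t => if pvIsVq w then w :: t.takeWhile pvIsV else w :: pvConsRun t

theorem pvIsVq_eq (c : Char) : pvIsVq c = (pvIsV c && !(c == 'y')) := by
  simp [pvIsVq, pvIsV, List.contains_eq_mem]
  by_cases h : c = 'y' <;> simp [h] <;> decide

theorem pvALoop_true (t : List Char) : ∀ (s : Int) (res : List Char), 1 ≤ s →
    pvALoop (PySem.List.enumerate t s) true res = res ++ t.takeWhile pvIsV := by
  induction t with
  | nil => intro s res _; simp [PySem.List.enumerate_nil, pvALoop]
  | cons w t ih =>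
    intro s res hs
    rw [PySem.List.enumerate_cons]
    have hnz : (s == (0 : Int)) = false := by simp; omega
    by_cases h : pvIsV w
    · simp only [pvALoop, h, if_true, hnz, Bool.false_and, Bool.false_eq_true, if_false,
        List.takeWhile_cons, ite_true]
      rw [ih (s + 1) (res ++ [w]) (by omega)]
      simp
    · simp [pvALoop, h, List.takeWhile_cons]

theorem pvALoop_false (t : List Char) : ∀ (s : Int) (res : List Char), 1 ≤ s →
    pvALoop (PySem.List.enumerate t s) false res = res ++ pvConsRun t := by
  induction t with
  | nil => intro s res _; simp [PySem.List.enumerate_nil, pvALoop, pvConsRun]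
  | cons w t ih =>
    intro s res hs
    rw [PySem.List.enumerate_cons]
    have hnz : (s == (0 : Int)) = false := by simp; omega
    by_cases h : pvIsV w
    · simp only [pvALoop, h, if_true, hnz, Bool.false_and, Bool.false_eq_true, if_false, ite_true]
      rw [pvALoop_true t (s + 1) (res ++ [w]) (by omega)]
      simp [pvConsRun, List.dropWhile_cons, List.takeWhile_cons, h]
    · simp only [pvALoop, h, Bool.false_eq_true, if_false, ite_false]
      rw [ih (s + 1) (res ++ [w]) (by omega)]
      simp only [pvConsRun, List.dropWhile_cons, List.takeWhile_cons, h]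
      cases hd : t.dropWhile (fun c => !pvIsV c) with
      | nil => rw [List.dropWhile_eq_nil_iff] at *; simp
      | cons v u => simp
theorem pvQual_lt (cs : List Char) (n j : Nat) (h : j < n - 1) :
    pvQual cs n j = pvIsV (cs.getD j ' ') := by
  have hne : (j != n - 1) = true := by simp; omega
  rw [pvQual, hne]
  by_cases hy : cs.getD j ' ' = 'y'
  · rw [hy]; decide
  · have hb : (cs.getD j ' ' == 'y') = false := beq_eq_false_iff_ne.mpr hy
    rw [pvIsVq_eq, hb]
    simp

theorem pvDropRev (cs : List Char) (f : Nat) (hfn : f < cs.length) :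
    cs.reverse.drop (cs.length - (f + 1)) =
      cs.getD f ' ' :: cs.reverse.drop (cs.length - f) := by
  have hlt : cs.length - (f + 1) < cs.reverse.length := by simp; omega
  rw [List.drop_eq_getElem_cons hlt]
  congr 1
  · rw [List.getElem_reverse, List.getD_eq_getElem cs ' ' hfn]
    congr 1
    omega
  · congr 1
    omega

theorem pvBFind_char (cs : List Char) : ∀ f : Nat, f + 1 ≤ cs.length →
    pvBFind cs cs.length f =
      (match (cs.reverse.drop (cs.length - f)).dropWhile (fun c => !pvIsV c) with
       | [] => none
       | _ :: _ => some (f - 1 - ((cs.reverse.drop (cs.length - f)).takeWhile (fun c => !pvIsV c)).length)) := by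
  intro f
  induction f with
  | zero =>
    intro _
    have h0 : cs.reverse.drop (cs.length - 0) = ([] : List Char) :=
      List.drop_eq_nil_of_le (by simp)
    rw [h0]
    simp [pvBFind]
  | succ f ih =>
    intro hf
    rw [pvDropRev cs f (by omega)]
    rw [pvBFind, pvQual_lt cs cs.length f (by omega)]
    set c := cs.getD f ' ' with hc
    by_cases h : pvIsV c
    · rw [if_pos h]
      simp [List.dropWhile_cons, List.takeWhile_cons, h]
    · rw [if_neg (by simp [h])]
      rw [ih (by omega)]
      simp only [List.dropWhile_cons, List.takeWhile_cons, h, Bool.not_false, if_true,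
        Bool.false_eq_true, if_false, ite_true, ite_false]
      cases hd : (cs.reverse.drop (cs.length - f)).dropWhile (fun c => !pvIsV c) with
      | nil => simp
      | cons v u =>
        simp only [List.length_cons]
        congr 1
        omega

theorem pvBGrow_char (cs : List Char) : ∀ g : Nat, g ≤ cs.length →
    pvBGrow cs g = g - ((cs.reverse.drop (cs.length - g)).takeWhile pvIsV).length := by
  intro g
  induction g with
  | zero => intro _; simp [pvBGrow]
  | succ g ih =>
    intro hg
    rw [pvDropRev cs g (by omega)]
    rw [pvBGrow]
    simp only [show pvIsVb = pvIsV from rfl]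
    set c := cs.getD g ' ' with hc
    by_cases h : pvIsV c
    · rw [if_pos h, ih (by omega)]
      simp only [List.takeWhile_cons, h, if_pos rfl, List.length_cons, ite_true]
      omega
    · rw [if_neg h]
      simp [List.takeWhile_cons, h]

theorem pv_take_takeWhile (p : Char → Bool) (t : List Char) :
    t.take (t.takeWhile p).length = t.takeWhile p := by
  induction t with
  | nil => rfl
  | cons w t ih =>
    by_cases h : p w <;> simp [List.takeWhile_cons, h, ih]

theorem pv_drop_eq (cs : List Char) (m : Nat) (hm : m ≤ cs.length) :
    cs.drop m = (cs.reverse.take (cs.length - m)).reverse := by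
  rw [List.take_reverse]
  congr 2
  simp
  omega
theorem pvCore_eq (cs : List Char) :
    (pvALoop (PySem.List.enumerate cs.reverse 0) false []).reverse =
      (match pvBFind cs cs.length cs.length with
       | none => cs
       | some j => cs.drop (pvBGrow cs j)) := by
  have hA : pvALoop (PySem.List.enumerate cs.reverse 0) false [] = pvS cs.reverse := by
    rcases hrs : cs.reverse with _ | ⟨w, t⟩
    · rw [PySem.List.enumerate_nil]; rfl
    · rw [PySem.List.enumerate_cons]
      by_cases h : pvIsV w
      · by_cases hy : w = 'y'
        · subst hy
          simp only [pvALoop, h, ite_true, if_pos (by decide : ((0:Int) == 0 && 'y' == 'y') = true)]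
          rw [pvALoop_false t (0 + 1) ([] ++ ['y']) (by omega)]
          simp [pvS, pvIsVq_eq, h]
        · have hby : ((0:Int) == 0 && w == 'y') = false := by
            simp [hy]
          simp only [pvALoop, h, ite_true, hby, Bool.false_eq_true, if_false]
          rw [pvALoop_true t (0 + 1) ([] ++ [w]) (by omega)]
          have hq : pvIsVq w = true := by rw [pvIsVq_eq]; simp [h, hy]
          simp [pvS, hq]
      · simp only [pvALoop, h, Bool.false_eq_true, if_false, ite_false]
        rw [pvALoop_false t (0 + 1) ([] ++ [w]) (by omega)]
        have hq : pvIsVq w = false := by rw [pvIsVq_eq]; simp [h]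
        simp [pvS, hq]
  rw [hA]
  rcases hrs : cs.reverse with _ | ⟨w, t⟩
  · have hcs : cs = [] := by simpa using congrArg List.reverse hrs
    subst hcs
    rfl
  · have hn : cs.length = t.length + 1 := by
      have := congrArg List.length hrs; simpa using this
    have hd0 := pvDropRev cs (cs.length - 1) (by omega)
    have h0 : cs.length - (cs.length - 1 + 1) = 0 := by omega
    rw [h0, List.drop_zero] at hd0
    have hd1 := hrs.symm.trans hd0
    have hw : cs.getD (cs.length - 1) ' ' = w := (List.cons_eq_cons.mp hd1).1.symm
    have hdrop1 : cs.reverse.drop (cs.length - (cs.length - 1)) = t :=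
      (List.cons_eq_cons.mp hd1).2.symm
    have hn1 : cs.length = t.length + 1 := hn
    have hfind : pvBFind cs cs.length cs.length =
        if pvIsVq w = true then some (cs.length - 1) else pvBFind cs cs.length (cs.length - 1) := by
      have hfu : cs.length = (cs.length - 1) + 1 := by omega
      rw [show pvBFind cs cs.length cs.length = pvBFind cs cs.length ((cs.length - 1) + 1) from
        by rw [← hfu]]
      rw [pvBFind]
      have hqual : pvQual cs cs.length (cs.length - 1) = pvIsVq w := by
        rw [pvQual, hw]
        have hne : ((cs.length - 1) != cs.length - 1) = false := by simp
        rw [hne]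
        simp
      rw [hqual]
    by_cases hq : pvIsVq w
    · -- last letter of the stripped word is in 'aeiou'
      rw [hfind, if_pos hq]
      show (pvS (w :: t)).reverse = cs.drop (pvBGrow cs (cs.length - 1))
      rw [pvBGrow_char cs (cs.length - 1) (by omega), hdrop1]
      set TL := (t.takeWhile pvIsV).length with hTL
      have hTLle : TL ≤ t.length := by
        rw [hTL]
        simpa using List.IsPrefix.length_le (List.takeWhile_prefix pvIsV)
      rw [pv_drop_eq cs (cs.length - 1 - TL) (by omega)]
      have hk : cs.length - (cs.length - 1 - TL) = TL + 1 := by omega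
      rw [hk, hrs]
      simp only [pvS, hq, ite_true, List.take_succ_cons]
      rw [hTL, pv_take_takeWhile]
    · rw [hfind, if_neg (by simp [hq])]
      rw [pvBFind_char cs (cs.length - 1) (by omega), hdrop1]
      simp only [pvS, hq, Bool.false_eq_true, ite_false]
      rcases hdw : t.dropWhile (fun c => !pvIsV c) with _ | ⟨v, u⟩
      · -- no counting vowel at all: B returns the whole stripped word
        show (w :: pvConsRun t).reverse = cs
        rw [pvConsRun, hdw]
        simpa using (congrArg List.reverse hrs).symm
      · show (w :: pvConsRun t).reverse = cs.drop (pvBGrow cs (cs.length - 1 - 1 -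
          ((t.takeWhile (fun c => !pvIsV c)).length)))
        set L := (t.takeWhile (fun c => !pvIsV c)).length with hL
        have htw : t = t.takeWhile (fun c => !pvIsV c) ++ v :: u := by
          conv_lhs => rw [← List.takeWhile_append_dropWhile (p := fun c => !pvIsV c) (l := t)]
          rw [hdw]
        have hlen : t.length = L + 1 + u.length := by
          conv_lhs => rw [htw]
          simp [hL]
          omega
        have hj : cs.length - 1 - 1 - L = u.length := by omega
        rw [hj, pvBGrow_char cs u.length (by omega)]
        have hdropu : cs.reverse.drop (cs.length - u.length) = u := by
          rw [hrs]
          have h2 : cs.length - u.length = (L + 1) + 1 := by omega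
          rw [h2, List.drop_succ_cons]
          conv_lhs => rw [htw]
          rw [show L + 1 = (t.takeWhile (fun c => !pvIsV c)).length + 1 from by rw [← hL]]
          rw [List.drop_length_add_append]
          rfl
        rw [hdropu]
        set UL := (u.takeWhile pvIsV).length with hUL
        have hULle : UL ≤ u.length := by
          rw [hUL]
          simpa using List.IsPrefix.length_le (List.takeWhile_prefix pvIsV)
        rw [pv_drop_eq cs (u.length - UL) (by omega)]
        have hk : cs.length - (u.length - UL) = (L + 1 + UL) + 1 := by omega
        rw [hk, hrs, List.take_succ_cons]
        have htake : t.take (L + 1 + UL) =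
            t.takeWhile (fun c => !pvIsV c) ++ v :: u.takeWhile pvIsV := by
          conv_lhs => rw [htw]
          rw [show L + 1 + UL = (t.takeWhile (fun c => !pvIsV c)).length + (1 + UL) from
            by rw [← hL]; omega]
          rw [List.take_length_add_append]
          rw [show 1 + UL = UL + 1 from by omega, List.take_succ_cons]
          rw [hUL, pv_take_takeWhile]
        rw [htake, pvConsRun, hdw]
-- ===== VERDICT (by name: the statement is the Claim_ definition above) =====
theorem getRhymePattern_spec : Claim_equal_getRhymePattern := by
  intro word _ hpre
  unfold Spec_getRhymePattern getRhymePattern getRhymePattern_alt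
  rcases h : word.toList with _ | ⟨c, rest⟩
  · exact absurd (by simpa using congrArg String.ofList h) hpre
  · simp only []
    rw [pvCore_eq]
    rcases pvBFind _ _ _ with _ | j <;> rfl
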